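-- pv_equiv track=rewrite | github.com/winvu88888888-maker/tinnam888888 | test_column_forensic.py | m_4gram
-- ===== SOURCE A (Python) =====
-- from collections import Counter, defaultdict
--
-- def m_transition(h, pos):
--     trans = defaultdict(Counter)
--     for i in range(len(h)-1):
--         trans[h[i][pos]][h[i+1][pos]] += 1
--     lv = h[-1][pos]
--     if lv in trans and trans[lv]:
--         return trans[lv].most_common(1)[0][0]
--     return lv
--
-- def m_bigram(h, pos):
--     if len(h) < 3: return h[-1][pos]
--     trans = defaultdict(Counter)
--     for i in range(len(h)-2):
--         key = (h[i][pos], h[i+1][pos])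
--         trans[key][h[i+2][pos]] += 1
--     key = (h[-2][pos], h[-1][pos])
--     if key in trans and trans[key]:
--         return trans[key].most_common(1)[0][0]
--     return m_transition(h, pos)
--
-- def m_trigram(h, pos):
--     if len(h) < 4: return m_bigram(h, pos)
--     trans = defaultdict(Counter)
--     for i in range(len(h)-3):
--         key = (h[i][pos], h[i+1][pos], h[i+2][pos])
--         trans[key][h[i+3][pos]] += 1
--     key = (h[-3][pos], h[-2][pos], h[-1][pos])
--     if key in trans and trans[key]:
--         return trans[key].most_common(1)[0][0]
--     return m_bigram(h, pos)
--
-- def m_4gram(h, pos):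
--     if len(h) < 5: return m_trigram(h, pos)
--     trans = defaultdict(Counter)
--     for i in range(len(h)-4):
--         key = (h[i][pos], h[i+1][pos], h[i+2][pos], h[i+3][pos])
--         trans[key][h[i+4][pos]] += 1
--     key = (h[-4][pos], h[-3][pos], h[-2][pos], h[-1][pos])
--     if key in trans and trans[key]:
--         return trans[key].most_common(1)[0][0]
--     return m_trigram(h, pos)
-- ===== SOURCE B (Python) =====
-- from collections import Counter
--
-- def m_4gram(h, pos):
--     if len(h) < 3:
--         return h[-1][pos]
--     col = [row[pos] for row in h]
--     m = len(col)
--     for n in (4, 3, 2, 1):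
--         if m < n + 1:
--             continue
--         tgt = col[m - n:]
--         cnt = Counter(col[i + n] for i in range(m - n) if col[i:i + n] == tgt)
--         if cnt:
--             return cnt.most_common(1)[0][0]
--     return col[-1]
-- ===== Notes on version B (the rewrite author's own statement) =====
-- stated objective: simpler
-- what changed: B replaces A's four dict-of-Counters transition tables and recursive fallback chain by one precomputed column and, per n-gram level from 4 down to 1, a single Counter filled in one pass over the positions whose preceding n-gram equals the target, returning its most common successor.
import Mathlib
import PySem

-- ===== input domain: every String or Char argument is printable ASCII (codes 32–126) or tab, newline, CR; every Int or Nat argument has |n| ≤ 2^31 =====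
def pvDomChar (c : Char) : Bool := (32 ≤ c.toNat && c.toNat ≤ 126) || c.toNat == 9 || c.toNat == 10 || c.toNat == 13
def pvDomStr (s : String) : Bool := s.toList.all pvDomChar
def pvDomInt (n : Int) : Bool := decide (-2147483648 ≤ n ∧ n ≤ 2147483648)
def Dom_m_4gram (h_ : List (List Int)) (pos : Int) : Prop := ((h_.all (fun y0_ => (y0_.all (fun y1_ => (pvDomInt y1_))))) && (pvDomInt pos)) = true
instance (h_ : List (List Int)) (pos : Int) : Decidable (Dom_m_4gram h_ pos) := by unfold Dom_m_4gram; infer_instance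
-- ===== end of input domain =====

-- B is SIMPLER: one precomputed column and a single Counter per n-gram level (one pass each),
-- instead of A's four dict-of-Counters transition tables with a recursive fallback chain.

-- shared indexing helper: h[i][pos] (both sources contain this expression); default 0 is only
-- reached outside Pre_m_4gram, where Python raises
def pvCell (h_ : List (List Int)) (i pos : Int) : Int :=
  PySem.List.pyGetD (PySem.List.pyGetD h_ i []) pos 0

-- Counter.most_common(1)[0][0]: first key of maximal count (PySem.List.max? returns the FIRST
-- extremal element, which is nlargest(1)'s tie-break on a Counter's insertion order)
def pvMostCommon1 (c : PySem.Dict Int Int) : Int :=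
  ((PySem.List.max? c.items (fun p => p.2)).getD (0, 0)).1

-- ===== PORT A =====
def m_transition (h_ : List (List Int)) (pos : Int) : Int :=
  let trans : PySem.Dict Int (PySem.Dict Int Int) :=
    (PySem.List.pyRange 0 ((h_.length : Int) - 1)).foldl
      (fun d i => d.modify (pvCell h_ i pos) PySem.Dict.empty
        (fun c => c.modify (pvCell h_ (i + 1) pos) 0 (· + 1))) PySem.Dict.empty
  let lv := pvCell h_ (-1) pos
  if trans.contains lv ∧ 0 < (trans.getD lv PySem.Dict.empty).size then
    pvMostCommon1 (trans.getD lv PySem.Dict.empty)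
  else lv

def m_bigram (h_ : List (List Int)) (pos : Int) : Int :=
  if h_.length < 3 then pvCell h_ (-1) pos
  else
    let trans : PySem.Dict (Int × Int) (PySem.Dict Int Int) :=
      (PySem.List.pyRange 0 ((h_.length : Int) - 2)).foldl
        (fun d i => d.modify (pvCell h_ i pos, pvCell h_ (i + 1) pos) PySem.Dict.empty
          (fun c => c.modify (pvCell h_ (i + 2) pos) 0 (· + 1))) PySem.Dict.empty
    let key := (pvCell h_ (-2) pos, pvCell h_ (-1) pos)
    if trans.contains key ∧ 0 < (trans.getD key PySem.Dict.empty).size then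
      pvMostCommon1 (trans.getD key PySem.Dict.empty)
    else m_transition h_ pos

def m_trigram (h_ : List (List Int)) (pos : Int) : Int :=
  if h_.length < 4 then m_bigram h_ pos
  else
    let trans : PySem.Dict (Int × Int × Int) (PySem.Dict Int Int) :=
      (PySem.List.pyRange 0 ((h_.length : Int) - 3)).foldl
        (fun d i => d.modify (pvCell h_ i pos, pvCell h_ (i + 1) pos, pvCell h_ (i + 2) pos)
          PySem.Dict.empty
          (fun c => c.modify (pvCell h_ (i + 3) pos) 0 (· + 1))) PySem.Dict.empty
    let key := (pvCell h_ (-3) pos, pvCell h_ (-2) pos, pvCell h_ (-1) pos)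
    if trans.contains key ∧ 0 < (trans.getD key PySem.Dict.empty).size then
      pvMostCommon1 (trans.getD key PySem.Dict.empty)
    else m_bigram h_ pos

def m_4gram (h_ : List (List Int)) (pos : Int) : Int :=
  if h_.length < 5 then m_trigram h_ pos
  else
    let trans : PySem.Dict (Int × Int × Int × Int) (PySem.Dict Int Int) :=
      (PySem.List.pyRange 0 ((h_.length : Int) - 4)).foldl
        (fun d i => d.modify
          (pvCell h_ i pos, pvCell h_ (i + 1) pos, pvCell h_ (i + 2) pos, pvCell h_ (i + 3) pos)
          PySem.Dict.empty
          (fun c => c.modify (pvCell h_ (i + 4) pos) 0 (· + 1))) PySem.Dict.empty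
    let key := (pvCell h_ (-4) pos, pvCell h_ (-3) pos, pvCell h_ (-2) pos, pvCell h_ (-1) pos)
    if trans.contains key ∧ 0 < (trans.getD key PySem.Dict.empty).size then
      pvMostCommon1 (trans.getD key PySem.Dict.empty)
    else m_trigram h_ pos

-- ===== PORT B =====
-- one level of Source B's loop body: None = 'continue' / empty Counter, some v = 'return v'
def pvLevel (col : List Int) (n : Nat) : Option Int :=
  if col.length < n + 1 then none
  else
    let tgt := PySem.List.slice col (some (-(n : Int))) none
    let cnt := PySem.Dict.counter
      (((PySem.List.pyRange 0 ((col.length : Int) - n)).filter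
          (fun i => PySem.List.slice col (some i) (some (i + n)) == tgt)).map
        (fun i => PySem.List.pyGetD col (i + n) 0))
    if 0 < cnt.size then some (pvMostCommon1 cnt) else none

def m_4gram_alt (h_ : List (List Int)) (pos : Int) : Int :=
  if h_.length < 3 then pvCell h_ (-1) pos
  else
    let col := h_.map (fun row => PySem.List.pyGetD row pos 0)
    (([4, 3, 2, 1] : List Nat).foldl
        (fun acc n => match acc with | some v => some v | none => pvLevel col n) none).getD
      (PySem.List.pyGetD col (-1) 0)

-- ===== PRECONDITION & SPEC =====
-- Pre_ excludes exactly the inputs on which Python A raises IndexError: empty h_, and, for the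
-- rows A actually indexes (only the last row when len < 3, every row otherwise), pos out of range.
def Pre_m_4gram (h_ : List (List Int)) (pos : Int) : Prop :=
  h_ ≠ [] ∧ (if h_.length < 3 then PySem.Raise.InRange (h_.getLastD []).length pos
             else ∀ row ∈ h_, PySem.Raise.InRange row.length pos)
instance (h_ : List (List Int)) (pos : Int) : Decidable (Pre_m_4gram h_ pos) := by
  unfold Pre_m_4gram PySem.Raise.InRange; infer_instance
def pvWitness_m_4gram : List (List Int) × Int := ([[1], [2], [1], [2], [1], [2]], 0)
def Spec_m_4gram (h_ : List (List Int)) (pos : Int) (out : Int) : Prop := out = m_4gram_alt h_ pos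
instance (h_ : List (List Int)) (pos : Int) (out : Int) : Decidable (Spec_m_4gram h_ pos out) := by unfold Spec_m_4gram; infer_instance

-- ===== CLAIM (what is proved, stated in full; the proofs are below) =====
def Claim_equal_m_4gram : Prop := ∀ (h_ : List (List Int)) (pos : Int), Dom_m_4gram h_ pos → Pre_m_4gram h_ pos → Spec_m_4gram h_ pos (m_4gram h_ pos)

-- ===== LEMMAS AND PROOFS =====
-- generic A-table lemmas
theorem pv_trans_getD_aux {κ : Type} [BEq κ] [LawfulBEq κ] [DecidableEq κ]
    (K : Int → κ) (V : Int → Int) (l : List Int) (d : PySem.Dict κ (PySem.Dict Int Int)) (k : κ) :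
    (l.foldl (fun d i => d.modify (K i) PySem.Dict.empty
        (fun c => c.modify (V i) 0 (· + 1))) d).getD k PySem.Dict.empty
      = ((l.filter (fun i => K i == k)).map V).foldl
          (fun c x => c.modify x 0 (· + 1)) (d.getD k PySem.Dict.empty) := by
  induction l generalizing d with
  | nil => rfl
  | cons i t ih =>
    simp only [List.foldl_cons, List.filter_cons]
    rw [ih]
    by_cases hk : K i = k
    · simp [hk]
    · have : (K i == k) = false := by simp [hk]
      simp [this, PySem.Dict.getD_modify, Ne.symm hk]

theorem pv_trans_getD {κ : Type} [BEq κ] [LawfulBEq κ] [DecidableEq κ]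
    (K : Int → κ) (V : Int → Int) (l : List Int) (k : κ) :
    (l.foldl (fun d i => d.modify (K i) PySem.Dict.empty
        (fun c => c.modify (V i) 0 (· + 1))) PySem.Dict.empty).getD k PySem.Dict.empty
      = PySem.Dict.counter ((l.filter (fun i => K i == k)).map V) := by
  rw [pv_trans_getD_aux, PySem.Dict.counter_eq_foldl, PySem.Dict.getD_empty]

theorem pv_trans_contains {κ : Type} [BEq κ] [LawfulBEq κ]
    (K : Int → κ) (V : Int → Int) (l : List Int) (k : κ) :
    (l.foldl (fun d i => d.modify (K i) PySem.Dict.empty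
        (fun c => c.modify (V i) 0 (· + 1)))
      (PySem.Dict.empty : PySem.Dict κ (PySem.Dict Int Int))).contains k = true
      ↔ ∃ i ∈ l, K i = k := by
  rw [PySem.Dict.contains_iff_mem_keys,
    PySem.Dict.keys_foldl_modify_key l K PySem.Dict.empty
      (fun _ i => fun c => c.modify (V i) 0 (· + 1)) PySem.Dict.empty]
  simp [PySem.Dict.keys_empty]

theorem pv_counter_size_pos (xs : List Int) :
    0 < (PySem.Dict.counter xs).size ↔ xs ≠ [] := by
  have hsz : (PySem.Dict.counter xs).size = (PySem.Dict.counter xs).items.length := rfl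
  rw [hsz, PySem.Dict.items_counter]
  cases xs with
  | nil => simp [PySem.Set.ofList]
  | cons x t =>
    simp only [List.length_map]
    constructor
    · intro _; simp
    · intro _
      have : x ∈ PySem.Set.ofList (x :: t) := (PySem.Set.mem_ofList _ _).mpr (by simp)
      exact List.length_pos_of_mem this

theorem pvCell_eq (h_ : List (List Int)) (pos i : Int) :
    pvCell h_ i pos = PySem.List.pyGetD (h_.map (fun row => PySem.List.pyGetD row pos 0)) i 0 := by
  have h0 : PySem.List.pyGetD ([] : List Int) pos 0 = 0 := by
    simp [PySem.List.pyGetD, PySem.List.pyGet?]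
  have := PySem.List.pyGetD_map (fun row => PySem.List.pyGetD row pos 0) h_ i []
  rw [h0] at this
  rw [this]; rfl

theorem pv_pyGetD_nonneg (xs : List Int) (i : Int) (h : 0 ≤ i) :
    PySem.List.pyGetD xs i 0 = xs.getD i.toNat 0 := by
  have := PySem.List.pyGet?_of_nonneg (xs := xs) h
  simp [PySem.List.pyGetD, this, List.getD_eq_getElem?_getD]

theorem pv_pyGetD_neg (xs : List Int) (k : Nat) (hk : 0 < k) (hlen : k ≤ xs.length) :
    PySem.List.pyGetD xs (-(k : Int)) 0 = xs.getD (xs.length - k) 0 := by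
  rw [PySem.List.pyGetD_neg_natCast xs k 0 hk hlen, List.getD_eq_getElem?_getD,
    List.getElem?_eq_getElem (by omega)]
  rfl

theorem pv_drop_take (xs : List Int) (j n : Nat) (h : j + n ≤ xs.length) :
    (xs.drop j).take n = (List.range n).map (fun t => xs.getD (j + t) 0) := by
  apply List.ext_getElem
  · simp; omega
  · intro t h1 h2
    simp only [List.getElem_take, List.getElem_drop, List.getElem_map, List.getElem_range]
    rw [List.getD_eq_getElem?_getD, List.getElem?_eq_getElem (by simp at h1 h2 ⊢; omega)]
    simp

theorem pv_tgt (xs : List Int) (n : Nat) (hn : 0 < n) (h : n ≤ xs.length) :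
    PySem.List.slice xs (some (-(n : Int))) none
      = (List.range n).map (fun t => xs.getD (xs.length - n + t) 0) := by
  rw [PySem.List.slice_from_neg_natCast xs n hn]
  rw [← pv_drop_take xs (xs.length - n) n (by omega)]
  exact (List.take_of_length_le (by simp; omega)).symm

theorem pv_slice_seg (xs : List Int) (i : Int) (n : Nat) (h0 : 0 ≤ i)
    (h : i.toNat + n ≤ xs.length) :
    PySem.List.slice xs (some i) (some (i + n))
      = (List.range n).map (fun t => xs.getD (i.toNat + t) 0) := by
  rw [PySem.List.slice_toNat xs h0 (by omega)]
  have hnn : ((i + (n : Int)).toNat - i.toNat) = n := by omega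
  rw [hnn, pv_drop_take _ _ _ h]

theorem pv_pred4 (col : List Int) (i : Int) (hi0 : 0 ≤ i) (hiu : i < (col.length : Int) - 4)
    (hcl : 5 ≤ col.length) :
    ((PySem.List.pyGetD col i 0, PySem.List.pyGetD col (i+1) 0, PySem.List.pyGetD col (i+2) 0,
      PySem.List.pyGetD col (i+3) 0) ==
     (PySem.List.pyGetD col (-4) 0, PySem.List.pyGetD col (-3) 0, PySem.List.pyGetD col (-2) 0,
      PySem.List.pyGetD col (-1) 0))
    = (PySem.List.slice col (some i) (some (i + 4)) == PySem.List.slice col (some (-4)) none) := by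
  rw [Bool.beq_eq_decide_eq, Bool.beq_eq_decide_eq]
  rw [decide_eq_decide]
  have h44 : (-4 : Int) = -((4:Nat) : Int) := by norm_num
  have h33 : (-3 : Int) = -((3:Nat) : Int) := by norm_num
  have h22 : (-2 : Int) = -((2:Nat) : Int) := by norm_num
  have h11 : (-1 : Int) = -((1:Nat) : Int) := by norm_num
  have hi4 : (i + 4 : Int) = i + ((4:Nat) : Int) := by norm_num
  rw [h44, h33, h22, h11, hi4]
  rw [pv_slice_seg col i 4 hi0 (by omega), pv_tgt col 4 (by norm_num) (by omega)]
  rw [pv_pyGetD_nonneg col i hi0, pv_pyGetD_nonneg col (i+1) (by omega),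
      pv_pyGetD_nonneg col (i+2) (by omega), pv_pyGetD_nonneg col (i+3) (by omega)]
  rw [pv_pyGetD_neg col 4 (by norm_num) (by omega), pv_pyGetD_neg col 3 (by norm_num) (by omega),
      pv_pyGetD_neg col 2 (by norm_num) (by omega), pv_pyGetD_neg col 1 (by norm_num) (by omega)]
  have e1 : (i+1).toNat = i.toNat + 1 := by omega
  have e2 : (i+2).toNat = i.toNat + 2 := by omega
  have e3 : (i+3).toNat = i.toNat + 3 := by omega
  rw [e1, e2, e3]
  simp only [List.range_succ, List.range_zero, List.map_cons, List.map_nil,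
    List.nil_append, List.cons_append, Nat.add_zero]
  have f1 : col.length - 4 + 1 = col.length - 3 := by omega
  have f2 : col.length - 4 + 2 = col.length - 2 := by omega
  have f3 : col.length - 4 + 3 = col.length - 1 := by omega
  rw [f1, f2, f3]
  simp [Prod.ext_iff]

theorem pv_pred3 (col : List Int) (i : Int) (hi0 : 0 ≤ i) (hiu : i < (col.length : Int) - 3)
    (hcl : 4 ≤ col.length) :
    ((PySem.List.pyGetD col i 0, PySem.List.pyGetD col (i+1) 0, PySem.List.pyGetD col (i+2) 0) ==
     (PySem.List.pyGetD col (-3) 0, PySem.List.pyGetD col (-2) 0, PySem.List.pyGetD col (-1) 0))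
    = (PySem.List.slice col (some i) (some (i + 3)) == PySem.List.slice col (some (-3)) none) := by
  rw [Bool.beq_eq_decide_eq, Bool.beq_eq_decide_eq]
  rw [decide_eq_decide]
  have h33 : (-3 : Int) = -((3:Nat) : Int) := by norm_num
  have h22 : (-2 : Int) = -((2:Nat) : Int) := by norm_num
  have h11 : (-1 : Int) = -((1:Nat) : Int) := by norm_num
  have hin : (i + 3 : Int) = i + ((3:Nat) : Int) := by norm_num
  rw [h33, h22, h11, hin]
  rw [pv_slice_seg col i 3 hi0 (by omega), pv_tgt col 3 (by norm_num) (by omega)]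
  rw [pv_pyGetD_nonneg col i hi0, pv_pyGetD_nonneg col (i+1) (by omega), pv_pyGetD_nonneg col (i+2) (by omega)]
  rw [pv_pyGetD_neg col 3 (by norm_num) (by omega), pv_pyGetD_neg col 2 (by norm_num) (by omega), pv_pyGetD_neg col 1 (by norm_num) (by omega)]
  have e1 : (i+1).toNat = i.toNat + 1 := by omega
  have e2 : (i+2).toNat = i.toNat + 2 := by omega
  rw [e1, e2]
  simp only [List.range_succ, List.range_zero, List.map_cons, List.map_nil,
    List.nil_append, List.cons_append, Nat.add_zero]
  have f1 : col.length - 3 + 1 = col.length - 2 := by omega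
  have f2 : col.length - 3 + 2 = col.length - 1 := by omega
  rw [f1, f2]
  simp [Prod.ext_iff]

theorem pv_pred2 (col : List Int) (i : Int) (hi0 : 0 ≤ i) (hiu : i < (col.length : Int) - 2)
    (hcl : 3 ≤ col.length) :
    ((PySem.List.pyGetD col i 0, PySem.List.pyGetD col (i+1) 0) ==
     (PySem.List.pyGetD col (-2) 0, PySem.List.pyGetD col (-1) 0))
    = (PySem.List.slice col (some i) (some (i + 2)) == PySem.List.slice col (some (-2)) none) := by
  rw [Bool.beq_eq_decide_eq, Bool.beq_eq_decide_eq]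
  rw [decide_eq_decide]
  have h22 : (-2 : Int) = -((2:Nat) : Int) := by norm_num
  have h11 : (-1 : Int) = -((1:Nat) : Int) := by norm_num
  have hin : (i + 2 : Int) = i + ((2:Nat) : Int) := by norm_num
  rw [h22, h11, hin]
  rw [pv_slice_seg col i 2 hi0 (by omega), pv_tgt col 2 (by norm_num) (by omega)]
  rw [pv_pyGetD_nonneg col i hi0, pv_pyGetD_nonneg col (i+1) (by omega)]
  rw [pv_pyGetD_neg col 2 (by norm_num) (by omega), pv_pyGetD_neg col 1 (by norm_num) (by omega)]
  have e1 : (i+1).toNat = i.toNat + 1 := by omega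
  rw [e1]
  simp only [List.range_succ, List.range_zero, List.map_cons, List.map_nil,
    List.nil_append, List.cons_append, Nat.add_zero]
  have f1 : col.length - 2 + 1 = col.length - 1 := by omega
  rw [f1]
  simp [Prod.ext_iff]

theorem pv_pred1 (col : List Int) (i : Int) (hi0 : 0 ≤ i) (hiu : i < (col.length : Int) - 1)
    (hcl : 2 ≤ col.length) :
    ((PySem.List.pyGetD col i 0) == (PySem.List.pyGetD col (-1) 0))
    = (PySem.List.slice col (some i) (some (i + 1)) == PySem.List.slice col (some (-1)) none) := by
  rw [Bool.beq_eq_decide_eq, Bool.beq_eq_decide_eq]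
  rw [decide_eq_decide]
  have h11 : (-1 : Int) = -((1:Nat) : Int) := by norm_num
  have hin : (i + 1 : Int) = i + ((1:Nat) : Int) := by norm_num
  rw [h11, hin]
  rw [pv_slice_seg col i 1 hi0 (by omega), pv_tgt col 1 (by norm_num) (by omega)]
  rw [pv_pyGetD_nonneg col i hi0]
  rw [pv_pyGetD_neg col 1 (by norm_num) (by omega)]

  simp only [List.range_succ, List.range_zero, List.map_cons, List.map_nil,
    List.nil_append, Nat.add_zero]

  simp

theorem pv_level4 (h_ : List (List Int)) (pos : Int) (h5 : 5 ≤ h_.length) :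
    m_4gram h_ pos =
      (match pvLevel (h_.map (fun row => PySem.List.pyGetD row pos 0)) 4 with
       | some v => v
       | none => m_trigram h_ pos) := by
  unfold m_4gram pvLevel
  simp only [pvCell_eq]
  set col := h_.map (fun row => PySem.List.pyGetD row pos 0) with hcol
  have hL : col.length = h_.length := by simp [hcol]
  rw [if_neg (by omega : ¬ h_.length < 5), if_neg (by omega : ¬ col.length < 4 + 1)]
  rw [pv_trans_getD
      (fun i => (PySem.List.pyGetD col i 0, PySem.List.pyGetD col (i+1) 0,
                 PySem.List.pyGetD col (i+2) 0, PySem.List.pyGetD col (i+3) 0))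
      (fun i => PySem.List.pyGetD col (i+4) 0)]
  rw [hL]
  simp only [Nat.cast_ofNat]
  have hpred : ∀ i ∈ PySem.List.pyRange 0 ((h_.length : Int) - 4),
      ((PySem.List.pyGetD col i 0, PySem.List.pyGetD col (i+1) 0, PySem.List.pyGetD col (i+2) 0,
        PySem.List.pyGetD col (i+3) 0) ==
       (PySem.List.pyGetD col (-4) 0, PySem.List.pyGetD col (-3) 0, PySem.List.pyGetD col (-2) 0,
        PySem.List.pyGetD col (-1) 0))
      = (PySem.List.slice col (some i) (some (i + 4)) == PySem.List.slice col (some (-4)) none) := by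
    intro i hi
    obtain ⟨hi0, hiu⟩ := PySem.List.mem_pyRange_one.mp hi
    exact pv_pred4 col i hi0 (by omega) (by omega)
  rw [List.filter_congr hpred]
  by_cases hF : List.filter
      (fun i => PySem.List.slice col (some i) (some (i + 4)) == PySem.List.slice col (some (-4)) none)
      (PySem.List.pyRange 0 ((h_.length : Int) - 4)) = []
  · rw [hF]
    simp only [List.map_nil]
    have hz : ¬ 0 < (PySem.Dict.counter ([] : List Int)).size := by
      intro hc; exact ((pv_counter_size_pos []).mp hc) rfl
    rw [if_neg hz, if_neg (by intro hc; exact hz hc.2)]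
  · have hposB : 0 < (PySem.Dict.counter (List.map (fun i => PySem.List.pyGetD col (i+4) 0)
        (List.filter (fun i => PySem.List.slice col (some i) (some (i + 4)) ==
            PySem.List.slice col (some (-4)) none)
          (PySem.List.pyRange 0 ((h_.length : Int) - 4))))).size := by
      apply (pv_counter_size_pos _).mpr
      simp [hF]
    have hcont : (List.foldl
        (fun d i => d.modify
          (PySem.List.pyGetD col i 0, PySem.List.pyGetD col (i+1) 0,
           PySem.List.pyGetD col (i+2) 0, PySem.List.pyGetD col (i+3) 0)
          PySem.Dict.empty (fun c => c.modify (PySem.List.pyGetD col (i+4) 0) 0 (· + 1)))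
        (PySem.Dict.empty : PySem.Dict (Int × Int × Int × Int) (PySem.Dict Int Int))
        (PySem.List.pyRange 0 ((h_.length : Int) - 4))).contains
        (PySem.List.pyGetD col (-4) 0, PySem.List.pyGetD col (-3) 0,
         PySem.List.pyGetD col (-2) 0, PySem.List.pyGetD col (-1) 0) = true := by
      apply (pv_trans_contains _ (fun i => PySem.List.pyGetD col (i+4) 0) _ _).mpr
      obtain ⟨i, hi⟩ := List.exists_mem_of_ne_nil _ hF
      have hmem := List.mem_filter.mp hi
      refine ⟨i, hmem.1, ?_⟩
      exact eq_of_beq (by rw [hpred i hmem.1]; exact hmem.2)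
    rw [if_pos ⟨hcont, hposB⟩, if_pos hposB]

theorem pv_level3 (h_ : List (List Int)) (pos : Int) (h5 : 4 ≤ h_.length) :
    m_trigram h_ pos =
      (match pvLevel (h_.map (fun row => PySem.List.pyGetD row pos 0)) 3 with
       | some v => v
       | none => m_bigram h_ pos) := by
  unfold m_trigram pvLevel
  simp only [pvCell_eq]
  set col := h_.map (fun row => PySem.List.pyGetD row pos 0) with hcol
  have hL : col.length = h_.length := by simp [hcol]
  rw [if_neg (by omega : ¬ h_.length < 4), if_neg (by omega : ¬ col.length < 3 + 1)]
  rw [pv_trans_getD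
      (fun i => (PySem.List.pyGetD col i 0, PySem.List.pyGetD col (i+1) 0,
                 PySem.List.pyGetD col (i+2) 0))
      (fun i => PySem.List.pyGetD col (i+3) 0)]
  rw [hL]
  simp only [Nat.cast_ofNat]
  have hpred : ∀ i ∈ PySem.List.pyRange 0 ((h_.length : Int) - 3),
      ((PySem.List.pyGetD col i 0, PySem.List.pyGetD col (i+1) 0, PySem.List.pyGetD col (i+2) 0) ==
       (PySem.List.pyGetD col (-3) 0, PySem.List.pyGetD col (-2) 0, PySem.List.pyGetD col (-1) 0))
      = (PySem.List.slice col (some i) (some (i + 3)) == PySem.List.slice col (some (-3)) none) := by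
    intro i hi
    obtain ⟨hi0, hiu⟩ := PySem.List.mem_pyRange_one.mp hi
    exact pv_pred3 col i hi0 (by omega) (by omega)
  rw [List.filter_congr hpred]
  by_cases hF : List.filter
      (fun i => PySem.List.slice col (some i) (some (i + 3)) == PySem.List.slice col (some (-3)) none)
      (PySem.List.pyRange 0 ((h_.length : Int) - 3)) = []
  · rw [hF]
    simp only [List.map_nil]
    have hz : ¬ 0 < (PySem.Dict.counter ([] : List Int)).size := by
      intro hc; exact ((pv_counter_size_pos []).mp hc) rfl
    rw [if_neg hz, if_neg (by intro hc; exact hz hc.2)]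
  · have hposB : 0 < (PySem.Dict.counter (List.map (fun i => PySem.List.pyGetD col (i+3) 0)
        (List.filter (fun i => PySem.List.slice col (some i) (some (i + 3)) ==
            PySem.List.slice col (some (-3)) none)
          (PySem.List.pyRange 0 ((h_.length : Int) - 3))))).size := by
      apply (pv_counter_size_pos _).mpr
      simp [hF]
    have hcont : (List.foldl
        (fun d i => d.modify
          (PySem.List.pyGetD col i 0, PySem.List.pyGetD col (i+1) 0,
           PySem.List.pyGetD col (i+2) 0)
          PySem.Dict.empty (fun c => c.modify (PySem.List.pyGetD col (i+3) 0) 0 (· + 1)))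
        (PySem.Dict.empty : PySem.Dict (Int × Int × Int) (PySem.Dict Int Int))
        (PySem.List.pyRange 0 ((h_.length : Int) - 3))).contains
        (PySem.List.pyGetD col (-3) 0,
         PySem.List.pyGetD col (-2) 0, PySem.List.pyGetD col (-1) 0) = true := by
      apply (pv_trans_contains _ (fun i => PySem.List.pyGetD col (i+3) 0) _ _).mpr
      obtain ⟨i, hi⟩ := List.exists_mem_of_ne_nil _ hF
      have hmem := List.mem_filter.mp hi
      refine ⟨i, hmem.1, ?_⟩
      exact eq_of_beq (by rw [hpred i hmem.1]; exact hmem.2)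
    rw [if_pos ⟨hcont, hposB⟩, if_pos hposB]

theorem pv_level2 (h_ : List (List Int)) (pos : Int) (h5 : 3 ≤ h_.length) :
    m_bigram h_ pos =
      (match pvLevel (h_.map (fun row => PySem.List.pyGetD row pos 0)) 2 with
       | some v => v
       | none => m_transition h_ pos) := by
  unfold m_bigram pvLevel
  simp only [pvCell_eq]
  set col := h_.map (fun row => PySem.List.pyGetD row pos 0) with hcol
  have hL : col.length = h_.length := by simp [hcol]
  rw [if_neg (by omega : ¬ h_.length < 3), if_neg (by omega : ¬ col.length < 2 + 1)]
  rw [pv_trans_getD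
      (fun i => (PySem.List.pyGetD col i 0, PySem.List.pyGetD col (i+1) 0))
      (fun i => PySem.List.pyGetD col (i+2) 0)]
  rw [hL]
  simp only [Nat.cast_ofNat]
  have hpred : ∀ i ∈ PySem.List.pyRange 0 ((h_.length : Int) - 2),
      ((PySem.List.pyGetD col i 0, PySem.List.pyGetD col (i+1) 0) ==
       (PySem.List.pyGetD col (-2) 0, PySem.List.pyGetD col (-1) 0))
      = (PySem.List.slice col (some i) (some (i + 2)) == PySem.List.slice col (some (-2)) none) := by
    intro i hi
    obtain ⟨hi0, hiu⟩ := PySem.List.mem_pyRange_one.mp hi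
    exact pv_pred2 col i hi0 (by omega) (by omega)
  rw [List.filter_congr hpred]
  by_cases hF : List.filter
      (fun i => PySem.List.slice col (some i) (some (i + 2)) == PySem.List.slice col (some (-2)) none)
      (PySem.List.pyRange 0 ((h_.length : Int) - 2)) = []
  · rw [hF]
    simp only [List.map_nil]
    have hz : ¬ 0 < (PySem.Dict.counter ([] : List Int)).size := by
      intro hc; exact ((pv_counter_size_pos []).mp hc) rfl
    rw [if_neg hz, if_neg (by intro hc; exact hz hc.2)]
  · have hposB : 0 < (PySem.Dict.counter (List.map (fun i => PySem.List.pyGetD col (i+2) 0)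
        (List.filter (fun i => PySem.List.slice col (some i) (some (i + 2)) ==
            PySem.List.slice col (some (-2)) none)
          (PySem.List.pyRange 0 ((h_.length : Int) - 2))))).size := by
      apply (pv_counter_size_pos _).mpr
      simp [hF]
    have hcont : (List.foldl
        (fun d i => d.modify
          (PySem.List.pyGetD col i 0, PySem.List.pyGetD col (i+1) 0)
          PySem.Dict.empty (fun c => c.modify (PySem.List.pyGetD col (i+2) 0) 0 (· + 1)))
        (PySem.Dict.empty : PySem.Dict (Int × Int) (PySem.Dict Int Int))
        (PySem.List.pyRange 0 ((h_.length : Int) - 2))).contains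
        (PySem.List.pyGetD col (-2) 0, PySem.List.pyGetD col (-1) 0) = true := by
      apply (pv_trans_contains _ (fun i => PySem.List.pyGetD col (i+2) 0) _ _).mpr
      obtain ⟨i, hi⟩ := List.exists_mem_of_ne_nil _ hF
      have hmem := List.mem_filter.mp hi
      refine ⟨i, hmem.1, ?_⟩
      exact eq_of_beq (by rw [hpred i hmem.1]; exact hmem.2)
    rw [if_pos ⟨hcont, hposB⟩, if_pos hposB]

theorem pv_level1 (h_ : List (List Int)) (pos : Int) (h5 : 2 ≤ h_.length) :
    m_transition h_ pos =
      (match pvLevel (h_.map (fun row => PySem.List.pyGetD row pos 0)) 1 with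
       | some v => v
       | none => PySem.List.pyGetD (h_.map (fun row => PySem.List.pyGetD row pos 0)) (-1) 0) := by
  unfold m_transition pvLevel
  simp only [pvCell_eq]
  set col := h_.map (fun row => PySem.List.pyGetD row pos 0) with hcol
  have hL : col.length = h_.length := by simp [hcol]
  rw [if_neg (by omega : ¬ col.length < 1 + 1)]
  rw [pv_trans_getD
      (fun i => PySem.List.pyGetD col i 0)
      (fun i => PySem.List.pyGetD col (i+1) 0)]
  rw [hL]
  simp only [Nat.cast_one]
  have hpred : ∀ i ∈ PySem.List.pyRange 0 ((h_.length : Int) - 1),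
      ((PySem.List.pyGetD col i 0) == (PySem.List.pyGetD col (-1) 0))
      = (PySem.List.slice col (some i) (some (i + 1)) == PySem.List.slice col (some (-1)) none) := by
    intro i hi
    obtain ⟨hi0, hiu⟩ := PySem.List.mem_pyRange_one.mp hi
    exact pv_pred1 col i hi0 (by omega) (by omega)
  rw [List.filter_congr hpred]
  by_cases hF : List.filter
      (fun i => PySem.List.slice col (some i) (some (i + 1)) == PySem.List.slice col (some (-1)) none)
      (PySem.List.pyRange 0 ((h_.length : Int) - 1)) = []
  · rw [hF]
    simp only [List.map_nil]
    have hz : ¬ 0 < (PySem.Dict.counter ([] : List Int)).size := by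
      intro hc; exact ((pv_counter_size_pos []).mp hc) rfl
    rw [if_neg hz, if_neg (by intro hc; exact hz hc.2)]
  · have hposB : 0 < (PySem.Dict.counter (List.map (fun i => PySem.List.pyGetD col (i+1) 0)
        (List.filter (fun i => PySem.List.slice col (some i) (some (i + 1)) ==
            PySem.List.slice col (some (-1)) none)
          (PySem.List.pyRange 0 ((h_.length : Int) - 1))))).size := by
      apply (pv_counter_size_pos _).mpr
      simp [hF]
    have hcont : (List.foldl
        (fun d i => d.modify
          (PySem.List.pyGetD col i 0)
          PySem.Dict.empty (fun c => c.modify (PySem.List.pyGetD col (i+1) 0) 0 (· + 1)))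
        (PySem.Dict.empty : PySem.Dict Int (PySem.Dict Int Int))
        (PySem.List.pyRange 0 ((h_.length : Int) - 1))).contains
        (PySem.List.pyGetD col (-1) 0) = true := by
      apply (pv_trans_contains _ (fun i => PySem.List.pyGetD col (i+1) 0) _ _).mpr
      obtain ⟨i, hi⟩ := List.exists_mem_of_ne_nil _ hF
      have hmem := List.mem_filter.mp hi
      refine ⟨i, hmem.1, ?_⟩
      exact eq_of_beq (by rw [hpred i hmem.1]; exact hmem.2)
    rw [if_pos ⟨hcont, hposB⟩, if_pos hposB]

theorem pv_level_none (col : List Int) (n : Nat) (h : col.length < n + 1) :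
    pvLevel col n = none := by
  unfold pvLevel
  rw [if_pos h]

theorem m_4gram_ports_eq (h_ : List (List Int)) (pos : Int) :
    m_4gram h_ pos = m_4gram_alt h_ pos := by
  by_cases h3 : h_.length < 3
  · unfold m_4gram m_trigram m_bigram m_4gram_alt
    rw [if_pos (by omega : h_.length < 5), if_pos (by omega : h_.length < 4), if_pos h3, if_pos h3]
  · have hB : m_4gram_alt h_ pos =
        (match pvLevel (h_.map (fun row => PySem.List.pyGetD row pos 0)) 4 with
         | some v => v
         | none => match pvLevel (h_.map (fun row => PySem.List.pyGetD row pos 0)) 3 with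
           | some v => v
           | none => match pvLevel (h_.map (fun row => PySem.List.pyGetD row pos 0)) 2 with
             | some v => v
             | none => match pvLevel (h_.map (fun row => PySem.List.pyGetD row pos 0)) 1 with
               | some v => v
               | none => PySem.List.pyGetD (h_.map (fun row => PySem.List.pyGetD row pos 0)) (-1) 0) := by
      unfold m_4gram_alt
      rw [if_neg h3]
      simp only [List.foldl_cons, List.foldl_nil]
      rcases pvLevel (h_.map (fun row => PySem.List.pyGetD row pos 0)) 4 with _ | v <;>
        rcases pvLevel (h_.map (fun row => PySem.List.pyGetD row pos 0)) 3 with _ | v3 <;>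
          rcases pvLevel (h_.map (fun row => PySem.List.pyGetD row pos 0)) 2 with _ | v2 <;>
            rcases pvLevel (h_.map (fun row => PySem.List.pyGetD row pos 0)) 1 with _ | v1 <;> rfl
    rw [hB]
    have hLm : (h_.map (fun row => PySem.List.pyGetD row pos 0)).length = h_.length := by simp
    by_cases h5 : h_.length < 5
    · have h40 : pvLevel (h_.map (fun row => PySem.List.pyGetD row pos 0)) 4 = none :=
        pv_level_none _ 4 (by omega)
      rw [h40]
      by_cases h4 : h_.length < 4
      · have h30 : pvLevel (h_.map (fun row => PySem.List.pyGetD row pos 0)) 3 = none :=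
          pv_level_none _ 3 (by omega)
        rw [h30]
        unfold m_4gram m_trigram
        rw [if_pos h5, if_pos h4]
        rw [pv_level2 h_ pos (by omega)]
        rcases pvLevel (h_.map (fun row => PySem.List.pyGetD row pos 0)) 2 with _ | v2
        · rw [pv_level1 h_ pos (by omega)]
        · rfl
      · unfold m_4gram
        rw [if_pos h5]
        rw [pv_level3 h_ pos (by omega)]
        rcases pvLevel (h_.map (fun row => PySem.List.pyGetD row pos 0)) 3 with _ | v3
        · rw [pv_level2 h_ pos (by omega)]
          rcases pvLevel (h_.map (fun row => PySem.List.pyGetD row pos 0)) 2 with _ | v2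
          · rw [pv_level1 h_ pos (by omega)]
          · rfl
        · rfl
    · rw [pv_level4 h_ pos (by omega)]
      rcases pvLevel (h_.map (fun row => PySem.List.pyGetD row pos 0)) 4 with _ | v4
      · rw [pv_level3 h_ pos (by omega)]
        rcases pvLevel (h_.map (fun row => PySem.List.pyGetD row pos 0)) 3 with _ | v3
        · rw [pv_level2 h_ pos (by omega)]
          rcases pvLevel (h_.map (fun row => PySem.List.pyGetD row pos 0)) 2 with _ | v2
          · rw [pv_level1 h_ pos (by omega)]
          · rfl
        · rfl
      · rfl

theorem m_4gram_spec : Claim_equal_m_4gram := by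
  intro h_ pos _ _
  unfold Spec_m_4gram
  exact m_4gram_ports_eq h_ pos
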